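-- pv_equiv track=rewrite | github.com/DangVuDev/AI_MEMORY_RESEARCH | scenarios/scenario_4_rag_vs_kg.py | rag_retrieval
-- ===== SOURCE A (Python) =====
-- from typing import List, Dict, Set
--
-- def rag_retrieval(question: str, documents: List[str], k: int = 5) -> List[str]:
--     """
--     Simple RAG retrieval using word overlap
--     """
--     query_words = set(question.lower().split())
--
--     scored_docs = []
--     for doc in documents:
--         doc_words = set(doc.lower().split())
--         overlap = len(query_words & doc_words)
--         scored_docs.append((doc, overlap))
--
--     scored_docs.sort(key=lambda x: x[1], reverse=True)
--     return [doc for doc, _ in scored_docs[:k]]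
-- ===== SOURCE B (Python) =====
-- from typing import List
--
-- def rag_retrieval(question: str, documents: List[str], k: int = 5) -> List[str]:
--     query_words = set(question.lower().split())
--
--     # inverted index: word -> list of doc indices (original order) containing it
--     postings = {}
--     for i, doc in enumerate(documents):
--         for w in set(doc.lower().split()):
--             postings.setdefault(w, []).append(i)
--
--     # accumulate overlap scores per doc index via the posting lists
--     scores = {}
--     for w in query_words:
--         for i in postings.get(w, []):
--             scores[i] = scores.get(i, 0) + 1
--
--     order = sorted(range(len(documents)), key=lambda i: scores.get(i, 0), reverse=True)
--     return [documents[i] for i in order[:k]]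
-- ===== Notes on version B (the rewrite author's own statement) =====
-- stated objective: alternative
-- what changed: B replaces A's per-document set-intersection scoring with an inverted index (word -> posting list of doc indices) built in one pass, accumulates scores by walking each query word's posting list, and stably sorts document indices by descending score instead of sorting (doc, score) pairs.
import Mathlib
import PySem

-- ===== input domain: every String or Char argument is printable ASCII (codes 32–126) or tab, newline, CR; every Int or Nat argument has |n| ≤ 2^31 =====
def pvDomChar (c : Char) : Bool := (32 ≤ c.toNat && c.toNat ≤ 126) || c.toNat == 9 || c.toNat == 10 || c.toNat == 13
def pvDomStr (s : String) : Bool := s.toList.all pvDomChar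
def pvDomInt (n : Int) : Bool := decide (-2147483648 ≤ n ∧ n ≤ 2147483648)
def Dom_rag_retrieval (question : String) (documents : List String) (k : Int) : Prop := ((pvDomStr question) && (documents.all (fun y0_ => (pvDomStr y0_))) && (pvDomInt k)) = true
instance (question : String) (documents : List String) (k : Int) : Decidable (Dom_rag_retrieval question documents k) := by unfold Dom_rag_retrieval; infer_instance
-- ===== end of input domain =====

-- B replaces per-document set intersection by an inverted index (word -> doc indices) and a stable
-- index sort; same return value proved (objective: alternative).

-- set(s.lower().split()) — this expression appears literally in both Pythons
def pvWords (s : String) : List String :=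
  PySem.Set.ofList (PySem.Str.split₀ (PySem.Str.lower s))

-- ===== PORT A =====
def rag_retrieval (question : String) (documents : List String) (k : Int) : List String :=
  let query_words := pvWords question
  let scored_docs := documents.foldl (fun acc doc =>
      acc ++ [(doc, PySem.Set.len (PySem.Set.inter query_words (pvWords doc)))]) []
  (PySem.List.slice (PySem.List.sorted scored_docs (fun x => x.2) true) none (some k)).map
    (fun p => p.1)

-- ===== PORT B =====
-- B's index-building loop: postings = {}; for i, doc in enumerate(documents):
--   for w in set(doc.lower().split()): postings.setdefault(w, []).append(i)
def pvPostings (documents : List String) : PySem.Dict String (List Int) :=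
  (PySem.List.enumerate documents).foldl (fun d p =>
    (pvWords p.2).foldl (fun d w => d.modify w [] (fun l => l ++ [p.1])) d) PySem.Dict.empty

def rag_retrieval_alt (question : String) (documents : List String) (k : Int) : List String :=
  let query_words := pvWords question
  let postings := pvPostings documents
  let scores : PySem.Dict Int Int :=
    query_words.foldl (fun d w =>
      (postings.getD w []).foldl (fun d i => d.modify i 0 (fun v => v + 1)) d) PySem.Dict.empty
  let order := PySem.List.sorted (PySem.List.pyRange 0 (documents.length : Int))
      (fun i => scores.getD i 0) true
  -- documents[i]: i always came from range(len(documents)), so it is in range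
  (PySem.List.slice order none (some k)).map (fun i => PySem.List.pyGetD documents i "")

-- ===== PRECONDITION & SPEC =====
def Spec_rag_retrieval (question : String) (documents : List String) (k : Int) (out : List String) : Prop := out = rag_retrieval_alt question documents k
instance (question : String) (documents : List String) (k : Int) (out : List String) : Decidable (Spec_rag_retrieval question documents k out) := by unfold Spec_rag_retrieval; infer_instance

-- ===== CLAIM (what is proved, stated in full; the proofs are below) =====
def Claim_equal_rag_retrieval : Prop := ∀ (question : String) (documents : List String) (k : Int), Dom_rag_retrieval question documents k → Spec_rag_retrieval question documents k (rag_retrieval question documents k)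

-- ===== LEMMAS AND PROOFS =====

lemma pvWords_nodup (s : String) : (pvWords s).Nodup := PySem.Set.nodup_ofList _

-- the (word, doc-index) pairs B's index-building loop feeds into the dict, flattened
def pvPairs (documents : List String) (s : Int) : List (String × Int) :=
  (PySem.List.enumerate documents s).flatMap (fun p => (pvWords p.2).map (fun w => (w, p.1)))

lemma insertBy_map {α β : Type} (f : α → β) (bef : β → β → Bool) (x : α) (ys : List α) :
    PySem.List.insertBy bef (f x) (ys.map f)
      = (PySem.List.insertBy (fun a b => bef (f a) (f b)) x ys).map f := by
  induction ys with
  | nil => simp [PySem.List.insertBy]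
  | cons y t ih =>
    simp only [List.map_cons, PySem.List.insertBy]
    split_ifs <;> simp_all

lemma foldl_insertBy_map {α β : Type} (f : α → β) (bef : β → β → Bool) (l : List α) (acc : List α) :
    l.foldl (fun acc x => PySem.List.insertBy bef (f x) acc) (acc.map f)
      = (l.foldl (fun acc x => PySem.List.insertBy (fun a b => bef (f a) (f b)) x acc) acc).map f := by
  induction l generalizing acc with
  | nil => rfl
  | cons x t ih =>
    simp only [List.foldl_cons]
    rw [insertBy_map]
    exact ih _

lemma sorted_map {α β κ : Type} [LT κ] [DecidableLT κ] (f : α → β) (key : β → κ)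
    (rev : Bool) (l : List α) :
    PySem.List.sorted (l.map f) key rev
      = (PySem.List.sorted l (fun a => key (f a)) rev).map f := by
  cases rev <;>
  · simp only [PySem.List.sorted, Bool.false_eq_true, if_false, if_true]
    rw [List.foldl_map]
    exact foldl_insertBy_map f _ l []

lemma insertBy_congr {α : Type} (b1 b2 : α → α → Bool) (x : α) (ys : List α)
    (h : ∀ y ∈ ys, b1 x y = b2 x y) :
    PySem.List.insertBy b1 x ys = PySem.List.insertBy b2 x ys := by
  induction ys with
  | nil => rfl
  | cons y t ih =>
    simp only [PySem.List.insertBy]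
    rw [h y (by simp)]
    split_ifs with hb
    · rfl
    · rw [ih (fun z hz => h z (by simp [hz]))]

lemma foldl_insertBy_key_congr {α κ : Type} (c : κ → κ → Bool) (k1 k2 : α → κ)
    (l acc : List α) (hl : ∀ x ∈ l, k1 x = k2 x) (hacc : ∀ y ∈ acc, k1 y = k2 y) :
    l.foldl (fun acc x => PySem.List.insertBy (fun a b => c (k1 a) (k1 b)) x acc) acc
      = l.foldl (fun acc x => PySem.List.insertBy (fun a b => c (k2 a) (k2 b)) x acc) acc := by
  induction l generalizing acc with
  | nil => rfl
  | cons x t ih =>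
    simp only [List.foldl_cons]
    have hx := hl x (by simp)
    rw [insertBy_congr _ _ _ _ (fun y hy => by rw [hx, hacc y hy])]
    exact ih _ (fun z hz => hl z (by simp [hz]))
      (fun y hy => by
        rcases (PySem.List.mem_insertBy _ _ _ _).mp hy with h | h
        · rw [h]; exact hx
        · exact hacc y h)

lemma sorted_key_congr {α κ : Type} [LT κ] [DecidableLT κ] (l : List α) (k1 k2 : α → κ)
    (rev : Bool) (h : ∀ x ∈ l, k1 x = k2 x) :
    PySem.List.sorted l k1 rev = PySem.List.sorted l k2 rev := by
  cases rev
  · simpa only [PySem.List.sorted, Bool.false_eq_true, if_false] using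
      foldl_insertBy_key_congr (fun p q => decide (p < q)) k1 k2 l [] h (by simp)
  · simpa only [PySem.List.sorted, if_true] using
      foldl_insertBy_key_congr (fun p q => decide (q < p)) k1 k2 l [] h (by simp)

lemma slice_map {α β : Type} (f : α → β) (l : List α) (a? b? : Option Int) :
    PySem.List.slice (l.map f) a? b? = (PySem.List.slice l a? b?).map f := by
  simp [PySem.List.slice, List.map_take, List.map_drop]

lemma count_flatMap {α β : Type} [BEq β] (l : List α) (g : α → List β) (j : β) :
    ((l.flatMap g).count j) = (l.map (fun x => (g x).count j)).sum := by
  induction l with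
  | nil => simp
  | cons x t ih => simp [List.count_append, ih]

lemma sum_map_ite_one {α : Type} (l : List α) (p : α → Prop) [DecidablePred p] :
    (l.map (fun x => if p x then 1 else 0)).sum = l.countP (fun x => decide (p x)) := by
  induction l with
  | nil => simp
  | cons x t ih => by_cases h : p x <;> simp [h, ih] <;> omega

lemma countP_pairs (documents : List String) (s i : Int) (w : String) :
    (pvPairs documents s).countP (fun q => q.2 == i && q.1 == w)
      = if s ≤ i ∧ i < s + documents.length
        then (pvWords (PySem.List.pyGetD documents (i - s) "")).count w else 0 := by
  induction documents generalizing s with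
  | nil => simp [pvPairs, PySem.List.enumerate]
  | cons doc t ih =>
    have hlen : ((doc :: t).length : Int) = (t.length : Int) + 1 := by
      push_cast [List.length_cons]; ring
    have hcons : PySem.List.enumerate (doc :: t) s = (s, doc) :: PySem.List.enumerate t (s + 1) := by
      simp [PySem.List.enumerate]
    rw [pvPairs, hcons, List.flatMap_cons, List.countP_append, List.countP_map, ← pvPairs, ih]
    by_cases hsi : s = i
    · subst hsi
      have hcnt : List.countP ((fun q : String × Int => q.2 == s && q.1 == w) ∘ (fun w' => (w', s))) (pvWords doc)
          = (pvWords doc).count w := by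
        rw [List.count]; apply List.countP_congr; intro a _; simp
      have hget : PySem.List.pyGetD (doc :: t) (s - s) "" = doc := by
        have hz : s - s = (0 : Int) := by omega
        rw [hz, PySem.List.pyGetD_eq_getElem (h0 := by omega) (h1 := by omega)]
        simp
      rw [hcnt, if_neg (by omega), if_pos (by omega), hget]
      omega
    · have h0 : List.countP ((fun q : String × Int => q.2 == i && q.1 == w) ∘ (fun w' => (w', s))) (pvWords doc) = 0 := by
        rw [List.countP_eq_zero]
        intro a _; simp [hsi]
      rw [h0]
      by_cases hlo : s ≤ i
      · by_cases hhi : i < s + 1 + t.length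
        · rw [if_pos (by omega), if_pos (by omega)]
          have e1 : PySem.List.pyGetD (doc :: t) (i - s) ""
              = PySem.List.pyGetD t (i - (s + 1)) "" := by
            rw [PySem.List.pyGetD_eq_getElem (h0 := by omega) (h1 := by omega),
                PySem.List.pyGetD_eq_getElem (h0 := by omega) (h1 := by omega)]
            have h2 : (i - s).toNat = (i - (s+1)).toNat + 1 := by omega
            simp [h2]
          rw [e1]
          omega
        · rw [if_neg (by omega), if_neg (by omega)]
      · rw [if_neg (by omega), if_neg (by omega)]

lemma postings_getD (documents : List String) (w : String) :
    (pvPostings documents).getD w []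
      = ((pvPairs documents 0).filter (fun q => q.1 == w)).map (fun q => q.2) := by
  have hb : pvPostings documents
      = (pvPairs documents 0).foldl (fun d q => d.modify q.1 [] (fun l => l ++ [q.2])) PySem.Dict.empty := by
    rw [pvPairs, List.foldl_flatMap, pvPostings]
    congr 1
    funext d p
    rw [List.foldl_map]
  rw [hb, PySem.Dict.getD_foldl_modify_append, PySem.Dict.getD_empty, List.nil_append]

lemma count_filter_map (l : List (String × Int)) (w : String) (i : Int) :
    ((l.filter (fun q => q.1 == w)).map (fun q => q.2)).count i
      = l.countP (fun q => q.2 == i && q.1 == w) := by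
  rw [List.count, List.countP_map, List.countP_filter]
  rfl

lemma scores_getD (qw : List String) (documents : List String) (i : Int)
    (h0 : 0 ≤ i) (h1 : i < documents.length) :
    (qw.foldl (fun d w =>
        ((pvPostings documents).getD w []).foldl (fun d i => d.modify i 0 (fun v => v + 1)) d)
      PySem.Dict.empty).getD i 0
      = PySem.Set.len (PySem.Set.inter qw (pvWords (PySem.List.pyGetD documents i ""))) := by
  rw [← List.foldl_flatMap, PySem.Dict.getD_foldl_modify_add_one, PySem.Dict.getD_empty, zero_add,
      count_flatMap]
  have hmap : qw.map (fun w => ((pvPostings documents).getD w []).count i)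
      = qw.map (fun w => if w ∈ pvWords (PySem.List.pyGetD documents i "") then 1 else 0) := by
    apply List.map_congr_left
    intro w _
    rw [postings_getD, count_filter_map, countP_pairs, if_pos ⟨h0, by simpa using h1⟩, sub_zero]
    by_cases hw : w ∈ pvWords (PySem.List.pyGetD documents i "")
    · rw [List.count_eq_one_of_mem (pvWords_nodup _) hw, if_pos hw]
    · rw [List.count_eq_zero_of_not_mem hw, if_neg hw]
  rw [hmap, sum_map_ite_one, PySem.Set.len, PySem.Set.inter, ← List.countP_eq_length_filter]
  have hc : List.countP (fun x => decide (x ∈ pvWords (PySem.List.pyGetD documents i ""))) qw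
      = List.countP (fun x => (pvWords (PySem.List.pyGetD documents i "")).contains x) qw := by
    apply List.countP_congr
    intro a _
    simp
  rw [hc]
  simp [PySem.Set.contains_eq_listContains]

-- ===== VERDICT (by name: the statement is the Claim_ definition above) =====
set_option maxHeartbeats 1000000 in
theorem rag_retrieval_spec : Claim_equal_rag_retrieval := by
  intro question documents k _
  unfold Spec_rag_retrieval rag_retrieval rag_retrieval_alt
  simp only [PySem.List.foldl_append_singleton_eq_map, List.nil_append]
  have hdocs0 : (PySem.List.pyRange 0 (documents.length : Int)).map
      (fun j => PySem.List.pyGetD documents j "") = documents := by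
    simpa [PySem.List.len] using PySem.List.map_pyGetD_pyRange_zero documents ""
  have hA : documents.map (fun doc => (doc, PySem.Set.len (PySem.Set.inter (pvWords question) (pvWords doc))))
      = (PySem.List.pyRange 0 (documents.length : Int)).map
          ((fun doc => (doc, PySem.Set.len (PySem.Set.inter (pvWords question) (pvWords doc))))
            ∘ (fun j => PySem.List.pyGetD documents j "")) := by
    conv_lhs => rw [← hdocs0]
    rw [List.map_map]
  rw [hA, sorted_map, slice_map, List.map_map]
  rw [sorted_key_congr (k2 := fun i =>
      ((pvWords question).foldl (fun d w =>
        ((pvPostings documents).getD w []).foldl (fun d i => d.modify i 0 (fun v => v + 1)) d)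
        PySem.Dict.empty).getD i 0)]
  · apply List.map_congr_left
    intro a _
    rfl
  · intro x hx
    rcases PySem.List.mem_pyRange_one.mp hx with ⟨hx0, hx1⟩
    exact (scores_getD (pvWords question) documents x hx0 hx1).symm
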